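-- pv_equiv track=rewrite | github.com/Aqua13131/lfx_python | exercise1/Untitled-1.py | replace_even_odd
-- ===== SOURCE A (Python) =====
-- def replace_even_odd(text):
--     words = text.split()
--     count_terrible = 0
--
--     for i in range(len(words)):
--         if words[i] == "terrible":
--             count_terrible += 1
--             if count_terrible % 2 == 0:
--                 words[i] = "pathetic"
--             else:
--                 words[i] = "marvellous"
--
--     return ' '.join(words)
-- ===== SOURCE B (Python) =====
-- def replace_even_odd(text):
--     words = text.split()
--     out = [
--         ("marvellous" if words[:i + 1].count("terrible") % 2 == 1 else "pathetic")
--         if w == "terrible" else w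
--         for i, w in enumerate(words)
--     ]
--     return ' '.join(out)
-- ===== Notes on version B (the rewrite author's own statement) =====
-- stated objective: alternative
-- what changed: A's single stateful scan with a mutable running counter and in-place list assignment is replaced by a stateless comprehension over enumerate(words) that decides each replacement from the parity of the count of 'terrible' in the prefix words[:i+1].
import Mathlib
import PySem

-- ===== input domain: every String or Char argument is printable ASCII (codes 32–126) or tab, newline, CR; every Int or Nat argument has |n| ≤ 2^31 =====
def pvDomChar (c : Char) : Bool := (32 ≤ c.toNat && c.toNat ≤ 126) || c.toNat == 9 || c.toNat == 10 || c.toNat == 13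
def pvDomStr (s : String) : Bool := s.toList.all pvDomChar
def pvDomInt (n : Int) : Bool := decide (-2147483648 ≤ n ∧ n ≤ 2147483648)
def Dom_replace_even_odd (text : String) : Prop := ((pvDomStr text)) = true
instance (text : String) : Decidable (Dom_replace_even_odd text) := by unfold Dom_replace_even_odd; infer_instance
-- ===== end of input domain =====

-- B replaces A's stateful counter scan by a stateless prefix-count comprehension over enumerate (alternative decomposition).


-- ===== PORT A =====
def replace_even_odd (text : String) : String :=
  let words := PySem.Str.split₀ text
  let res := (PySem.List.pyRange 0 (words.length : Int) 1).foldl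
    (fun (st : List String × Int) i =>
      if PySem.List.pyGetD st.1 i "" == "terrible" then
        let c := st.2 + 1
        if PySem.Int.mod c 2 == 0 then (PySem.List.pySetD st.1 i "pathetic", c)
        else (PySem.List.pySetD st.1 i "marvellous", c)
      else st)
    (words, (0 : Int))
  PySem.Str.join " " res.1

-- ===== PORT B =====
def replace_even_odd_alt (text : String) : String :=
  let words := PySem.Str.split₀ text
  let out := (PySem.List.enumerate words 0).map (fun p =>
    if p.2 == "terrible" then
      (if PySem.Int.mod ((words.take (p.1.toNat + 1)).count "terrible" : Int) 2 == 1
       then "marvellous" else "pathetic")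
    else p.2)
  PySem.Str.join " " out

-- ===== PRECONDITION & SPEC =====
def Spec_replace_even_odd (text : String) (out : String) : Prop := out = replace_even_odd_alt text
instance (text : String) (out : String) : Decidable (Spec_replace_even_odd text out) := by unfold Spec_replace_even_odd; infer_instance

-- ===== CLAIM (what is proved, stated in full; the proofs are below) =====
def Claim_equal_replace_even_odd : Prop := ∀ (text : String), Dom_replace_even_odd text → Spec_replace_even_odd text (replace_even_odd text)

-- ===== LEMMAS AND PROOFS =====

-- common reference recursion: the replaced suffix, given the count of 'terrible' seen so far
def goRep : List String → Int → List String
  | [], _ => []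
  | w :: t, c =>
    if w == "terrible" then
      (if PySem.Int.mod (c + 1) 2 == 0 then "pathetic" else "marvellous") :: goRep t (c + 1)
    else w :: goRep t c

lemma A_loop : ∀ (ws pre : List String) (c : Int),
    (PySem.List.pyRange (pre.length : Int) ((pre.length : Int) + (ws.length : Int)) 1).foldl
      (fun (st : List String × Int) i =>
        if PySem.List.pyGetD st.1 i "" == "terrible" then
          let c := st.2 + 1
          if PySem.Int.mod c 2 == 0 then (PySem.List.pySetD st.1 i "pathetic", c)
          else (PySem.List.pySetD st.1 i "marvellous", c)
        else st)
      (pre ++ ws, c)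
    = (pre ++ goRep ws c, c + (ws.count "terrible" : Int)) := by
  intro ws
  induction ws with
  | nil =>
    intro pre c
    simp [PySem.List.pyRange, goRep]
  | cons w t ih =>
    intro pre c
    rw [PySem.List.pyRange_one_cons (by simp)]
    rw [List.foldl_cons]
    have hget : PySem.List.pyGetD (pre ++ w :: t) (pre.length : Int) "" = w := by
      simp [PySem.List.pyGetD_natCast, List.getD]
    have hset : ∀ v, PySem.List.pySetD (pre ++ w :: t) (pre.length : Int) v = (pre ++ [v]) ++ t := by
      intro v
      simp [PySem.List.pySetD_natCast]
    have hend : (pre.length : Int) + ((w :: t).length : Int) = (((pre ++ [w]).length : Nat) : Int) + (t.length : Int) := by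
      simp; ring
    have hstart : (pre.length : Int) + 1 = (((pre ++ [w]).length : Nat) : Int) := by
      simp
    by_cases hw : w = "terrible"
    · subst hw
      by_cases hm : PySem.Int.mod (c + 1) 2 = 0
      · simp only [hget, beq_self_eq_true, if_true, hm, hset]
        have hstart' : (pre.length : Int) + 1 = (((pre ++ ["pathetic"]).length : Nat) : Int) := by simp
        have hend' : (pre.length : Int) + (("terrible" :: t).length : Int) = (((pre ++ ["pathetic"]).length : Nat) : Int) + (t.length : Int) := by
          simp; ring
        rw [hstart', hend', ih]
        simp only [goRep, hm, beq_self_eq_true, if_true, List.append_assoc, List.cons_append,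
          List.nil_append, List.count_cons, beq_self_eq_true, Prod.mk.injEq]
        constructor
        · trivial
        · push_cast; ring
      · have hm' : (PySem.Int.mod (c + 1) 2 == 0) = false := by simpa using hm
        simp only [hget, beq_self_eq_true, if_true, hm', Bool.false_eq_true, if_false, hset]
        have hstart' : (pre.length : Int) + 1 = (((pre ++ ["marvellous"]).length : Nat) : Int) := by simp
        have hend' : (pre.length : Int) + (("terrible" :: t).length : Int) = (((pre ++ ["marvellous"]).length : Nat) : Int) + (t.length : Int) := by
          simp; ring
        rw [hstart', hend', ih]
        simp only [goRep, hm', Bool.false_eq_true, if_false, List.append_assoc, List.cons_append,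
          List.nil_append, List.count_cons, beq_self_eq_true, Prod.mk.injEq]
        constructor
        · trivial
        · push_cast; ring
    · have hw' : (w == "terrible") = false := by simpa using hw
      simp only [hget, hw', Bool.false_eq_true, if_false]
      have hassoc : pre ++ w :: t = (pre ++ [w]) ++ t := by simp
      rw [hassoc, hstart, hend, ih]
      simp only [goRep, hw', Bool.false_eq_true, if_false, List.append_assoc, List.cons_append,
        List.nil_append, List.count_cons, Prod.mk.injEq]
      constructor
      · trivial
      · simp

lemma B_map (words : List String) : ∀ (ws : List String) (k : Nat),
    words.drop k = ws →
    (PySem.List.enumerate ws (k : Int)).map (fun p =>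
      if p.2 == "terrible" then
        (if PySem.Int.mod ((words.take (p.1.toNat + 1)).count "terrible" : Int) 2 == 1
         then "marvellous" else "pathetic")
      else p.2)
    = goRep ws ((words.take k).count "terrible" : Int) := by
  intro ws
  induction ws with
  | nil => intro k h; simp [PySem.List.enumerate, goRep]
  | cons w t ih =>
    intro k h
    have hk : words[k]? = some w := by
      have h0 : (words.drop k)[0]? = some w := by rw [h]; rfl
      simpa using h0
    have ht : words.drop (k + 1) = t := by
      have h2 : words.drop (k + 1) = (words.drop k).drop 1 := by
        rw [List.drop_drop]
      simp [h2, h]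
    have htake : words.take (k + 1) = words.take k ++ [w] := by
      rw [List.take_add_one, hk]; rfl
    rw [PySem.List.enumerate_cons, List.map_cons]
    have hcast : (k : Int) + 1 = ((k + 1 : Nat) : Int) := by norm_cast
    rw [hcast, ih (k + 1) ht]
    set c := (words.take k).count "terrible" with hc
    have hmod : PySem.Int.mod ((c + 1 : Nat) : Int) 2 = (((c + 1) % 2 : Nat) : Int) := by
      exact_mod_cast PySem.Int.mod_natCast (c + 1) 2
    by_cases hw : w = "terrible"
    · subst hw
      have hcnt : (words.take (k + 1)).count "terrible" = c + 1 := by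
        rw [htake]; simp; exact hc.symm
      simp only [beq_self_eq_true, if_true, Int.toNat_natCast, goRep, hcnt]
      rcases Nat.mod_two_eq_zero_or_one (c + 1) with hp | hp
      · have h1 : PySem.Int.mod ((c : Int) + 1) 2 = 0 := by
          rw [show ((c : Int) + 1) = ((c + 1 : Nat) : Int) from by norm_cast, hmod, hp]; rfl
        rw [hmod, hp, h1]
        norm_num
      · have h1 : PySem.Int.mod ((c : Int) + 1) 2 = 1 := by
          rw [show ((c : Int) + 1) = ((c + 1 : Nat) : Int) from by norm_cast, hmod, hp]; rfl
        rw [hmod, hp, h1]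
        norm_num
    · have hw' : (w == "terrible") = false := by simpa using hw
      have hcnt : (words.take (k + 1)).count "terrible" = c := by
        rw [htake]; simp [List.count_append, hw]; exact hc.symm
      simp only [hw', Bool.false_eq_true, if_false, goRep, hcnt]

-- ===== VERDICT (by name: the statement is the Claim_ definition above) =====
theorem replace_even_odd_spec : Claim_equal_replace_even_odd := by
  intro text _
  simp only [Spec_replace_even_odd, replace_even_odd, replace_even_odd_alt]
  have hA := A_loop (PySem.Str.split₀ text) [] 0
  simp only [List.length_nil, Nat.cast_zero, List.nil_append, zero_add] at hA
  have hB := B_map (PySem.Str.split₀ text) (PySem.Str.split₀ text) 0 (by simp)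
  simp only [Nat.cast_zero, List.take_zero, List.count_nil] at hB
  rw [hA, hB]
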